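-- pv_equiv track=rewrite | github.com/shoulton/CompGen | HW2/hw2q2.py | kmer
-- ===== SOURCE A (Python) =====
-- def kmer(k, seq):
--     kmers = {}
--     for i in range(len(seq) - k + 1):
--         kmer = seq[i:i+k]
--         if kmer in kmers:
--             kmers[kmer].append(i)
--         else:
--             kmers[kmer] = [i]
--     return kmers
-- ===== SOURCE B (Python) =====
-- def kmer(k, seq):
--     pairs = [(seq[i:i+k], i) for i in range(len(seq) - k + 1)]
--     keys = list(dict.fromkeys(s for s, _ in pairs))
--     return {s: [i for t, i in pairs if t == s] for s in keys}
-- ===== Notes on version B (the rewrite author's own statement) =====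
-- stated objective: alternative
-- what changed: Instead of one pass accumulating positions into a dict with an append-or-insert branch, B materialises the (substring, position) index list once, dedups the substrings in first-occurrence order (dict.fromkeys), and builds the result by gathering each key's positions from the index with a comprehension.
import Mathlib
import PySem

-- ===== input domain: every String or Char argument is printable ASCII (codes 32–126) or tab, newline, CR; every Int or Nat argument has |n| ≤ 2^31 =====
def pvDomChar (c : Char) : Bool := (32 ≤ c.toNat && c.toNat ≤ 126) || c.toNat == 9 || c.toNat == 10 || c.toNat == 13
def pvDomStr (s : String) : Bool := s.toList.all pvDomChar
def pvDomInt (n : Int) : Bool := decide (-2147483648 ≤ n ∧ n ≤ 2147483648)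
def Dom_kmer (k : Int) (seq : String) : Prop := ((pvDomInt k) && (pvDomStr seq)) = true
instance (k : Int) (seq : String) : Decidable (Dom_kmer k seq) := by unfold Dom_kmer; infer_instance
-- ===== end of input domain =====

-- B replaces A's single-pass dict accumulation by materialising the (substring, position)
-- index once and gathering each first-occurrence key's positions from it (objective: alternative).

-- ===== PORT A =====
-- A: one pass over range(len(seq)-k+1), accumulating positions into a dict.
def kmer (k : Int) (seq : String) : List (String × List Int) :=
  ((PySem.List.pyRange 0 (PySem.Str.len seq - k + 1) 1).foldl
    (fun (kmers : PySem.Dict String (List Int)) (i : Int) =>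
      let km := PySem.Str.slice seq (some i) (some (i + k))
      if kmers.contains km then
        kmers.modify km [] (fun v => v ++ [i])      -- kmers[kmer].append(i)
      else
        kmers.insert km [i])                        -- kmers[kmer] = [i]
    PySem.Dict.empty).items

-- ===== PORT B =====
-- B: build the pairs index, dedup the keys (dict.fromkeys order), gather per key.
def kmer_alt (k : Int) (seq : String) : List (String × List Int) :=
  let pairs : List (String × Int) :=
    (PySem.List.pyRange 0 (PySem.Str.len seq - k + 1) 1).map
      (fun i => (PySem.Str.slice seq (some i) (some (i + k)), i))
  let keys : List String := PySem.List.dedup (pairs.map (fun p => p.1))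
  keys.map (fun s => (s, (pairs.filter (fun p => p.1 == s)).map (fun p => p.2)))

-- ===== PRECONDITION & SPEC =====
def Spec_kmer (k : Int) (seq : String) (out : List (String × List Int)) : Prop := out = kmer_alt k seq
instance (k : Int) (seq : String) (out : List (String × List Int)) : Decidable (Spec_kmer k seq out) := by unfold Spec_kmer; infer_instance

-- ===== CLAIM (what is proved, stated in full; the proofs are below) =====
def Claim_equal_kmer : Prop := ∀ (k : Int) (seq : String), Dom_kmer k seq → Spec_kmer k seq (kmer k seq)

-- ===== LEMMAS AND PROOFS =====

-- A's if/contains step is exactly a `modify` with default [].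
theorem kmer_step_eq_modify (d : PySem.Dict String (List Int)) (km : String) (i : Int) :
    (if d.contains km then d.modify km [] (fun v => v ++ [i]) else d.insert km [i])
      = d.modify km [] (fun v => v ++ [i]) := by
  by_cases h : d.contains km = true
  · simp [h]
  · have hc : d.contains km = false := eq_false_of_ne_true h
    simp [hc, PySem.Dict.modify, PySem.Dict.getD_of_not_contains d [] hc]

theorem kmer_eq_fold_pairs (k : Int) (seq : String) :
    kmer k seq =
      (((PySem.List.pyRange 0 (PySem.Str.len seq - k + 1) 1).map
          (fun i => (PySem.Str.slice seq (some i) (some (i + k)), i))).foldl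
        (fun (d : PySem.Dict String (List Int)) p => d.modify p.1 [] (fun v => v ++ [p.2]))
        PySem.Dict.empty).items := by
  unfold kmer
  rw [List.foldl_map]
  congr 2
  funext d i
  exact kmer_step_eq_modify d _ i

theorem kmer_spec' (k : Int) (seq : String) : kmer k seq = kmer_alt k seq := by
  rw [kmer_eq_fold_pairs]
  unfold kmer_alt
  set pairs : List (String × Int) :=
    (PySem.List.pyRange 0 (PySem.Str.len seq - k + 1) 1).map
      (fun i => (PySem.Str.slice seq (some i) (some (i + k)), i)) with hpairs
  have hfold :
      (pairs.foldl (fun (d : PySem.Dict String (List Int)) p => d.modify p.1 [] (fun v => v ++ [p.2]))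
        PySem.Dict.empty)
      = (pairs.foldl (fun (d : PySem.Dict String (List Int)) x =>
          d.modify ((fun (p : String × Int) => p.1) x) []
            ((fun (_ : PySem.Dict String (List Int)) (x : String × Int) (v : List Int) => v ++ [x.2]) d x))
          PySem.Dict.empty) := rfl
  have hnd : ((pairs.foldl (fun (d : PySem.Dict String (List Int)) p =>
      d.modify p.1 [] (fun v => v ++ [p.2])) PySem.Dict.empty)).keys.Nodup := by
    rw [hfold]
    exact PySem.Dict.nodup_keys_foldl_modify_key _ _ _ _ _ (by simp [PySem.Dict.keys_empty])
  rw [PySem.Dict.items_eq_map_keys _ hnd []]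
  have hkeys : ((pairs.foldl (fun (d : PySem.Dict String (List Int)) p =>
      d.modify p.1 [] (fun v => v ++ [p.2])) PySem.Dict.empty)).keys
      = PySem.List.dedup (pairs.map (fun p => p.1)) := by
    rw [hfold, PySem.Dict.keys_foldl_modify_key]
    rw [PySem.List.dedup_eq_ofList, PySem.Set.ofList_eq_foldl]
    simp [PySem.Dict.keys_empty, PySem.Set.update]
  rw [hkeys]
  refine List.map_congr_left (fun s _ => ?_)
  rw [PySem.Dict.getD_foldl_modify_append]
  simp [PySem.Dict.getD_empty]

-- ===== VERDICT (by name: the statement is the Claim_ definition above) =====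
theorem kmer_spec : Claim_equal_kmer := by
  intro k seq _
  unfold Spec_kmer
  exact kmer_spec' k seq
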